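-- pv_equiv track=rewrite | github.com/Murad9288/ALL_Contest_Problem_Oj | Codeforces_OJ_Problem_Solve/A - AB Balance.py | AB_Balance2
-- ===== SOURCE A (Python) =====
-- def AB_Balance1(s):
--     ab = 0
--     ba = 0
--     for i in range(len(s) - 1):
--         if s[i:i+2] == "ab":
--             ab += 1
--         elif s[i:i+2] =="ba":
--             ba += 1
--     return ab,ba
--
-- def AB_Balance2(s):
--     ab,ba = AB_Balance1(s)
--     if ab == ba:
--         return s
--     for i in range(len(s)):
--         t = ""
--         for j in range(len(s)):
--             if i != j:
--                 t += s[j]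
--             else:
--                 t += "ab"[s[i] == "a"]
--         ab, ba = AB_Balance1(t)
--         if ab == ba:
--             return t
-- ===== SOURCE B (Python) =====
-- def AB_Balance2(s):
--     def val(x, y):
--         if x == 'a' and y == 'b':
--             return 1
--         if x == 'b' and y == 'a':
--             return -1
--         return 0
--     d = 0
--     for x, y in zip(s, s[1:]):
--         d += val(x, y)
--     if d == 0:
--         return s
--     n = len(s)
--     for i, c in enumerate(s):
--         r = 'b' if c == 'a' else 'a'
--         dd = d
--         if i > 0:
--             dd += val(s[i-1], r) - val(s[i-1], c)
--         if i + 1 < n: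
--             dd += val(r, s[i+1]) - val(c, s[i+1])
--         if dd == 0:
--             return s[:i] + r + s[i+1:]
-- ===== Notes on version B (the rewrite author's own statement) =====
-- stated objective: faster
-- what changed: B computes the ab/ba pair-count difference once in one pass and, for each candidate flip position, updates that difference in O(1) from the at most two adjacent pairs it touches (instead of A rebuilding the whole string and recounting all pairs for every position), building the result string once by slicing.
-- outside the precondition, e.g. on AB_Balance2('abxab'): A returns None, B returns None
import Mathlib
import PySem

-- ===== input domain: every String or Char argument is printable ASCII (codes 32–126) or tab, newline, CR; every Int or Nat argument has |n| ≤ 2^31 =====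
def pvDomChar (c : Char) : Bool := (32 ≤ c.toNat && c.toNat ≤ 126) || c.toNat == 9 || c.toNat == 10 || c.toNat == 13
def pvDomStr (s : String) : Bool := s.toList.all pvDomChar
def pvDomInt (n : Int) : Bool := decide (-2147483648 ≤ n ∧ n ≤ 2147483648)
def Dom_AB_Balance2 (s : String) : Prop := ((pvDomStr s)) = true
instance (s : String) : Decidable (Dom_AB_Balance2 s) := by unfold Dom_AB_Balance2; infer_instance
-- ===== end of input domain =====

-- B changes A's quadratic rebuild-and-recount per flip position into a single-pass count plus O(1) local updates (objective: faster).
-- Return-value equivalence only; neither version mutates its argument.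

-- ===== PORT A =====
-- AB_Balance1: count of "ab" and "ba" two-char slices
def pvAbba (l : List Char) : Int × Int :=
  (PySem.List.pyRange 0 ((l.length : Int) - 1) 1).foldl
    (fun (p : Int × Int) i =>
      if PySem.List.slice l (some i) (some (i + 2)) = ['a', 'b'] then (p.1 + 1, p.2)
      else if PySem.List.slice l (some i) (some (i + 2)) = ['b', 'a'] then (p.1, p.2 + 1)
      else p) (0, 0)

-- the inner j-loop of A: t built character by character
def pvBuildT (l : List Char) (i : Int) : List Char :=
  (PySem.List.pyRange 0 (l.length : Int) 1).foldl
    (fun t j =>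
      if i ≠ j then t ++ [PySem.List.pyGetD l j ' ']
      else t ++ [if PySem.List.pyGetD l i ' ' = 'a' then 'b' else 'a']) []

-- the outer i-loop of A with its early return; on fall-through Python returns None (outside Pre_), the port returns []
def pvALoop (l : List Char) : List Int → List Char
  | [] => []
  | i :: rest =>
      let t := pvBuildT l i
      let p := pvAbba t
      if p.1 = p.2 then t else pvALoop l rest

def AB_Balance2 (s : String) : String :=
  let p := pvAbba s.toList
  if p.1 = p.2 then s
  else String.ofList (pvALoop s.toList (PySem.List.pyRange 0 (s.toList.length : Int) 1))

-- ===== PORT B =====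
def pvVal (x y : Char) : Int :=
  if x = 'a' ∧ y = 'b' then 1 else if x = 'b' ∧ y = 'a' then -1 else 0

-- B's loop over enumerate(s); on fall-through Python returns None (outside Pre_), the port returns []
def pvBLoop (l : List Char) (d : Int) : List (Int × Char) → List Char
  | [] => []
  | (i, c) :: rest =>
      let r := if c = 'a' then 'b' else 'a'
      let dd := d
        + (if 0 < i then pvVal (PySem.List.pyGetD l (i - 1) ' ') r
                      - pvVal (PySem.List.pyGetD l (i - 1) ' ') c else 0)
        + (if i + 1 < (l.length : Int) then pvVal r (PySem.List.pyGetD l (i + 1) ' ')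
                      - pvVal c (PySem.List.pyGetD l (i + 1) ' ') else 0)
      if dd = 0 then
        PySem.List.slice l none (some i) ++ [r] ++ PySem.List.slice l (some (i + 1)) none
      else pvBLoop l d rest

def AB_Balance2_alt (s : String) : String :=
  let l := s.toList
  let d := (l.zip l.tail).foldl (fun a p => a + pvVal p.1 p.2) 0
  if d = 0 then s
  else String.ofList (pvBLoop l d (PySem.List.enumerate l 0))

-- ===== PRECONDITION & SPEC =====
-- signed difference (#ab - #ba) over adjacent pairs, used to state Pre_
def pvDsum : List Char → Int
  | x :: y :: r => pvVal x y + pvDsum (y :: r)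
  | _ => 0

-- Pre_ excludes exactly the inputs (they need letters other than 'a'/'b') on which A's search finds no
-- balancing single-character flip, falls off its loop and returns None — not a str; B does the same there.
def Pre_AB_Balance2 (s : String) : Prop :=
  pvDsum s.toList = 0 ∨
    ∃ k ∈ List.range s.toList.length,
      pvDsum (s.toList.set k (if s.toList.getD k ' ' = 'a' then 'b' else 'a')) = 0
instance (s : String) : Decidable (Pre_AB_Balance2 s) := by unfold Pre_AB_Balance2; infer_instance

def pvWitness_AB_Balance2 : String := "ab"

def Spec_AB_Balance2 (s : String) (out : String) : Prop := out = AB_Balance2_alt s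
instance (s : String) (out : String) : Decidable (Spec_AB_Balance2 s out) := by unfold Spec_AB_Balance2; infer_instance

-- ===== CLAIM (what is proved, stated in full; the proofs are below) =====
def Claim_equal_AB_Balance2 : Prop := ∀ (s : String), Dom_AB_Balance2 s → Pre_AB_Balance2 s → Spec_AB_Balance2 s (AB_Balance2 s)

-- ===== LEMMAS AND PROOFS =====

-- structural ab/ba counters used to characterise pvAbba
def pvCab : List Char → Int
  | x :: y :: r => (if x = 'a' ∧ y = 'b' then 1 else 0) + pvCab (y :: r)
  | _ => 0
def pvCba : List Char → Int
  | x :: y :: r => (if x = 'b' ∧ y = 'a' then 1 else 0) + pvCba (y :: r)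
  | _ => 0

theorem pvAbbaFold (l : List Char) : ∀ (p : Int × Int),
    (List.range (l.length - 1)).foldl
      (fun (p : Int × Int) k =>
        if (l.drop k).take 2 = ['a','b'] then (p.1 + 1, p.2)
        else if (l.drop k).take 2 = ['b','a'] then (p.1, p.2 + 1)
        else p) p = (p.1 + pvCab l, p.2 + pvCba l) := by
  induction l with
  | nil => simp [pvCab, pvCba]
  | cons x xs ih =>
    cases xs with
    | nil => simp [pvCab, pvCba]
    | cons y r =>
      intro p
      rw [show (x :: y :: r).length - 1 = r.length + 1 by simp, List.range_succ_eq_map,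
          List.foldl_cons, List.foldl_map]
      have hc : ∀ (p : Int × Int) (k : Nat),
          (fun (p : Int × Int) k =>
            if ((x :: y :: r).drop k).take 2 = ['a','b'] then (p.1 + 1, p.2)
            else if ((x :: y :: r).drop k).take 2 = ['b','a'] then (p.1, p.2 + 1)
            else p) p (k + 1)
          = (fun (p : Int × Int) k =>
            if ((y :: r).drop k).take 2 = ['a','b'] then (p.1 + 1, p.2)
            else if ((y :: r).drop k).take 2 = ['b','a'] then (p.1, p.2 + 1)
            else p) p k := fun p k => rfl
      simp only [hc]
      have ih' := ih
      rw [show (y :: r).length - 1 = r.length by simp] at ih'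
      rw [ih']
      have e0 : ((x :: y :: r).drop 0).take 2 = [x, y] := rfl
      simp only [e0, List.cons.injEq, and_true]
      have hab : pvCab (x :: y :: r) = (if x = 'a' ∧ y = 'b' then 1 else 0) + pvCab (y :: r) := by
        simp [pvCab]
      have hba : pvCba (x :: y :: r) = (if x = 'b' ∧ y = 'a' then 1 else 0) + pvCba (y :: r) := by
        simp [pvCba]
      rw [hab, hba]
      split_ifs with h1 h2 <;> simp_all <;> try omega

theorem pvAbba_spec (l : List Char) : pvAbba l = (pvCab l, pvCba l) := by
  unfold pvAbba
  rw [PySem.List.pyRange_one, List.foldl_map]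
  have hn : (((l.length : Int) - 1) - 0).toNat = l.length - 1 := by omega
  rw [hn]
  have hs : ∀ k : Nat, PySem.List.slice l (some (0 + (k:Int))) (some (0 + (k:Int) + 2))
      = (l.drop k).take 2 := by
    intro k
    rw [show (0 + (k:Int)) = ((k:Nat):Int) by omega,
        show ((k:Nat):Int) + 2 = (((k+2:Nat)):Int) by push_cast; ring,
        PySem.List.slice_natCast]
    congr 1
    omega
  simp only [hs]
  have := pvAbbaFold l (0, 0)
  simpa using this

theorem pvDsum_eq_sub (l : List Char) : pvDsum l = pvCab l - pvCba l := by
  induction l with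
  | nil => simp [pvDsum, pvCab, pvCba]
  | cons x xs ih =>
    cases xs with
    | nil => simp [pvDsum, pvCab, pvCba]
    | cons y r =>
      simp only [pvDsum, pvCab, pvCba, pvVal] at *
      split_ifs with h1 h2 <;> simp_all <;> omega

theorem pvZipfold (l : List Char) (a : Int) :
    (l.zip l.tail).foldl (fun a p => a + pvVal p.1 p.2) a = a + pvDsum l := by
  induction l generalizing a with
  | nil => simp [pvDsum]
  | cons x xs ih =>
    cases xs with
    | nil => simp [pvDsum]
    | cons y r =>
      rw [show (x :: y :: r).zip (x :: y :: r).tail = (x, y) :: ((y :: r).zip (y :: r).tail) from rfl,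
          List.foldl_cons, ih]
      simp [pvDsum]
      ring

theorem pvBuildT_eq_set (l : List Char) (k : Nat) (hk : k < l.length) :
    pvBuildT l (k : Int) = l.set k (if l[k] = 'a' then 'b' else 'a') := by
  unfold pvBuildT
  have hb : ∀ (t : List Char) (j : Int),
      (fun (t : List Char) j =>
        if (k : Int) ≠ j then t ++ [PySem.List.pyGetD l j ' ']
        else t ++ [if PySem.List.pyGetD l (k : Int) ' ' = 'a' then 'b' else 'a']) t j
      = t ++ [(fun j => if (k : Int) ≠ j then PySem.List.pyGetD l j ' '
               else if PySem.List.pyGetD l (k : Int) ' ' = 'a' then 'b' else 'a') j] := by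
    intro t j
    by_cases h : (k : Int) ≠ j <;> simp [h]
  simp only [hb]
  rw [PySem.List.foldl_append_singleton_eq_map, List.nil_append,
      PySem.List.pyRange_one, List.map_map]
  apply List.ext_getElem
  · simp
  · intro j hj hj'
    have hjlen : j < l.length := by simpa using hj'
    simp only [List.getElem_map, List.getElem_range, Function.comp_apply]
    have hgk : PySem.List.pyGetD l (k : Int) ' ' = l[k] := by
      rw [PySem.List.pyGetD_natCast, List.getD_eq_getElem l ' ' hk]
    have hgj : PySem.List.pyGetD l (0 + (j : Int)) ' ' = l[j] := by
      rw [show (0 + (j:Int)) = ((j:Nat):Int) by omega, PySem.List.pyGetD_natCast,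
          List.getD_eq_getElem l ' ' hjlen]
    by_cases h : k = j
    · subst h
      simp [hgk]
    · have : (k : Int) ≠ 0 + (j : Int) := by omega
      simp [h, List.getElem?_eq_getElem hjlen]

theorem pvDsumCons (x : Char) (t : List Char) :
    pvDsum (x :: t) = (match t.head? with | some y => pvVal x y | none => 0) + pvDsum t := by
  cases t <;> simp [pvDsum]

theorem pvDsumSurgery (u : List Char) (c : Char) (v : List Char) :
    pvDsum (u ++ c :: v) = pvDsum u
      + (match u.getLast? with | some x => pvVal x c | none => 0)
      + (match v.head? with | some y => pvVal c y | none => 0) + pvDsum v := by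
  induction u with
  | nil => simp [pvDsumCons, pvDsum]
  | cons x u ih =>
    rw [List.cons_append, pvDsumCons, ih, pvDsumCons]
    cases u with
    | nil => simp [pvDsum]; ring
    | cons z u' => simp [List.getLast?_cons_cons]; ring

-- adjacency surgery: changing one character changes pvDsum by the local pair deltas
theorem pvDsum_set (l : List Char) (k : Nat) (hk : k < l.length) (r : Char) :
    pvDsum (l.set k r) = pvDsum l
      + (if 0 < k then pvVal l[k-1]! r - pvVal l[k-1]! l[k] else 0)
      + (if k + 1 < l.length then pvVal r l[k+1]! - pvVal l[k] l[k+1]! else 0) := by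
  have hset : l.set k r = l.take k ++ r :: l.drop (k+1) := List.set_eq_take_cons_drop r hk
  have hl : l = l.take k ++ l[k] :: l.drop (k+1) := by
    conv_lhs => rw [← List.take_append_drop k l]
    rw [List.drop_eq_getElem_cons hk]
  rw [hset, pvDsumSurgery]
  have hd := congrArg pvDsum hl
  rw [pvDsumSurgery] at hd
  rw [hd]
  have hlast : (l.take k).getLast? = (if 0 < k then some l[k-1]! else none) := by
    by_cases h : 0 < k
    · rw [if_pos h, List.getLast?_eq_getElem?]
      simp only [List.length_take, List.getElem?_take]
      rw [if_pos (by omega), List.getElem!_eq_getElem?_getD,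
          show min k l.length - 1 = k - 1 by omega]
      cases hx : l[k-1]? with
      | none => simp at hx; omega
      | some x => simp
    · rw [if_neg h, List.getLast?_eq_none_iff]
      simp [show k = 0 by omega]
  have hhead : (l.drop (k+1)).head? = (if k + 1 < l.length then some l[k+1]! else none) := by
    rw [List.head?_drop]
    by_cases h : k + 1 < l.length
    · rw [if_pos h, List.getElem?_eq_getElem h, List.getElem!_eq_getElem?_getD,
          List.getElem?_eq_getElem h]
      rfl
    · rw [if_neg h, List.getElem?_eq_none_iff]
      omega
  rw [hlast, hhead]
  by_cases h0 : 0 < k <;> by_cases h1 : k + 1 < l.length <;>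
    simp only [h0, h1, if_true, if_false] <;> ring

theorem pvLoops_eq (l : List Char) (ks : List Nat) (hks : ∀ k ∈ ks, k < l.length) :
    pvALoop l (ks.map (fun (k : Nat) => (k : Int))) =
      pvBLoop l (pvDsum l) (ks.map (fun (k : Nat) => ((k : Int), l[k]!))) := by
  induction ks with
  | nil => simp [pvALoop, pvBLoop]
  | cons k ks ih =>
    have hk : k < l.length := hks k (by simp)
    have hcc : l[k]! = l[k] := by
      simp [List.getElem!_eq_getElem?_getD, List.getElem?_eq_getElem hk]
    rw [List.map_cons, List.map_cons]
    have hA : pvALoop l ((k : Int) :: ks.map (fun (k : Nat) => (k : Int))) =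
        (if (pvAbba (pvBuildT l (k : Int))).1 = (pvAbba (pvBuildT l (k : Int))).2
         then pvBuildT l (k : Int) else pvALoop l (ks.map (fun (k : Nat) => (k : Int)))) := rfl
    have hB : pvBLoop l (pvDsum l) (((k : Int), l[k]!) :: ks.map (fun (k : Nat) => ((k : Int), l[k]!))) =
        (if (pvDsum l
              + (if 0 < (k : Int) then pvVal (PySem.List.pyGetD l ((k : Int) - 1) ' ') (if l[k]! = 'a' then 'b' else 'a')
                    - pvVal (PySem.List.pyGetD l ((k : Int) - 1) ' ') l[k]! else 0)
              + (if (k : Int) + 1 < (l.length : Int) then pvVal (if l[k]! = 'a' then 'b' else 'a') (PySem.List.pyGetD l ((k : Int) + 1) ' ')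
                    - pvVal l[k]! (PySem.List.pyGetD l ((k : Int) + 1) ' ') else 0)) = 0
         then PySem.List.slice l none (some (k : Int)) ++ [if l[k]! = 'a' then 'b' else 'a']
                ++ PySem.List.slice l (some ((k : Int) + 1)) none
         else pvBLoop l (pvDsum l) (ks.map (fun (k : Nat) => ((k : Int), l[k]!)))) := rfl
    rw [hA, hB, pvBuildT_eq_set l k hk, pvAbba_spec, hcc]
    set r : Char := if l[k] = 'a' then 'b' else 'a' with hr
    have hdd : (pvDsum l
          + (if 0 < (k : Int) then pvVal (PySem.List.pyGetD l ((k : Int) - 1) ' ') r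
                - pvVal (PySem.List.pyGetD l ((k : Int) - 1) ' ') l[k] else 0)
          + (if (k : Int) + 1 < (l.length : Int) then pvVal r (PySem.List.pyGetD l ((k : Int) + 1) ' ')
                - pvVal l[k] (PySem.List.pyGetD l ((k : Int) + 1) ' ') else 0))
        = pvDsum (l.set k r) := by
      rw [pvDsum_set l k hk r]
      congr 1
      · congr 1
        by_cases h0 : 0 < k
        · rw [if_pos (by omega : (0:Int) < (k:Int)), if_pos h0,
              show ((k : Int) - 1) = ((k - 1 : Nat) : Int) by omega, PySem.List.pyGetD_natCast,
              List.getD_eq_getElem l ' ' (by omega),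
              show l[k-1]! = l[k-1] by
                simp [List.getElem!_eq_getElem?_getD, List.getElem?_eq_getElem (show k-1 < l.length by omega)]]
        · rw [if_neg (by omega : ¬ (0:Int) < (k:Int)), if_neg h0]
      · by_cases h1 : k + 1 < l.length
        · rw [if_pos (by omega : (k : Int) + 1 < (l.length : Int)), if_pos h1,
              show ((k : Int) + 1) = ((k + 1 : Nat) : Int) by omega, PySem.List.pyGetD_natCast,
              List.getD_eq_getElem l ' ' h1,
              show l[k+1]! = l[k+1] by
                simp [List.getElem!_eq_getElem?_getD, List.getElem?_eq_getElem h1]]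
        · rw [if_neg (by omega : ¬ (k : Int) + 1 < (l.length : Int)), if_neg h1]
    rw [hdd]
    have hcond : (pvCab (l.set k r) = pvCba (l.set k r)) ↔ (pvDsum (l.set k r) = 0) := by
      have := pvDsum_eq_sub (l.set k r)
      omega
    by_cases hz : pvDsum (l.set k r) = 0
    · rw [if_pos hz, if_pos (hcond.mpr hz)]
      rw [PySem.List.slice_to l (by omega : (0:Int) ≤ (k:Int)),
          PySem.List.slice_from l (by omega : (0:Int) ≤ (k:Int) + 1),
          show ((k : Int)).toNat = k by omega, show ((k : Int) + 1).toNat = k + 1 by omega,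
          List.set_eq_take_cons_drop r hk]
      simp
    · rw [if_neg hz, if_neg (fun h => hz (hcond.mp h))]
      exact ih (fun k hkm => hks k (List.mem_cons_of_mem _ hkm))

-- ===== VERDICT (by name: the statement is the Claim_ definition above) =====
theorem AB_Balance2_spec : Claim_equal_AB_Balance2 := by
  intro s _ _
  show AB_Balance2 s = AB_Balance2_alt s
  rw [show AB_Balance2 s = (if (pvAbba s.toList).1 = (pvAbba s.toList).2 then s
        else String.ofList (pvALoop s.toList (PySem.List.pyRange 0 (s.toList.length : Int) 1))) from rfl,
      show AB_Balance2_alt s = (if ((s.toList.zip s.toList.tail).foldl (fun a p => a + pvVal p.1 p.2) 0) = 0 then s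
        else String.ofList (pvBLoop s.toList
          ((s.toList.zip s.toList.tail).foldl (fun a p => a + pvVal p.1 p.2) 0)
          (PySem.List.enumerate s.toList 0))) from rfl,
      pvAbba_spec, pvZipfold s.toList 0]
  simp only [zero_add]
  have hsub := pvDsum_eq_sub s.toList
  have hrange : PySem.List.pyRange 0 (s.toList.length : Int) 1
      = (List.range s.toList.length).map (fun (k : Nat) => (k : Int)) := by
    rw [PySem.List.pyRange_one]
    simp
  have henum : PySem.List.enumerate s.toList 0
      = (List.range s.toList.length).map (fun (k : Nat) => ((k : Int), s.toList[k]!)) := by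
    rw [PySem.List.enumerate_eq_map_pyRange s.toList ' ']
    rw [show PySem.List.len s.toList = (s.toList.length : Int) from PySem.List.len_eq s.toList]
    rw [hrange, List.map_map]
    apply List.map_congr_left
    intro k hkm
    have hk : k < s.toList.length := List.mem_range.mp hkm
    simp only [Function.comp_apply, PySem.List.pyGetD_natCast, List.getD_eq_getElem s.toList ' ' hk,
      List.getElem!_eq_getElem?_getD, List.getElem?_eq_getElem hk, Option.getD_some]
  by_cases hz : pvDsum s.toList = 0
  · rw [if_pos (by omega), if_pos hz]
  · rw [if_neg (by omega), if_neg hz, hrange, henum]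
    exact congrArg String.ofList
      (pvLoops_eq s.toList (List.range s.toList.length) (fun k hkm => List.mem_range.mp hkm))
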